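-- pv_equiv track=rewrite | github.com/charukad/Dynamic-Cognitive-Intelligence-System | backend/src/services/advanced/mirror/personality_model.py | _count_trait_markers
-- ===== SOURCE A (Python) =====
-- from typing import Dict, List, Any
--
-- def _count_trait_markers(
--
--     messages: List[Dict],
--     high_markers: set,
--     low_markers: set
-- ) -> tuple:
--     """Count high and low trait indicator words"""
--     high_count = 0
--     low_count = 0
--
--     for msg in messages:
--         content = msg.get('content', '').lower()
--         words = content.split()
--
--         high_count += sum(1 for word in words if word in high_markers)
--         low_count += sum(1 for word in words if word in low_markers)
--
--     return high_count, low_count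
-- ===== SOURCE B (Python) =====
-- def _count_trait_markers(messages, high_markers, low_markers):
--     """Count high and low trait indicator words via a word-frequency table."""
--     counts = {}
--     for msg in messages:
--         for word in msg.get('content', '').lower().split():
--             counts[word] = counts.get(word, 0) + 1
--     high_count = sum(counts.get(w, 0) for w in high_markers)
--     low_count = sum(counts.get(w, 0) for w in low_markers)
--     return high_count, low_count
-- ===== Notes on version B (the rewrite author's own statement) =====
-- stated objective: alternative
-- what changed: Instead of testing each word against both marker sets per message, B builds one word-frequency dict over all messages and then sums the table lookups per marker, reversing the traversal direction (markers outer, words pre-aggregated).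
import Mathlib
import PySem

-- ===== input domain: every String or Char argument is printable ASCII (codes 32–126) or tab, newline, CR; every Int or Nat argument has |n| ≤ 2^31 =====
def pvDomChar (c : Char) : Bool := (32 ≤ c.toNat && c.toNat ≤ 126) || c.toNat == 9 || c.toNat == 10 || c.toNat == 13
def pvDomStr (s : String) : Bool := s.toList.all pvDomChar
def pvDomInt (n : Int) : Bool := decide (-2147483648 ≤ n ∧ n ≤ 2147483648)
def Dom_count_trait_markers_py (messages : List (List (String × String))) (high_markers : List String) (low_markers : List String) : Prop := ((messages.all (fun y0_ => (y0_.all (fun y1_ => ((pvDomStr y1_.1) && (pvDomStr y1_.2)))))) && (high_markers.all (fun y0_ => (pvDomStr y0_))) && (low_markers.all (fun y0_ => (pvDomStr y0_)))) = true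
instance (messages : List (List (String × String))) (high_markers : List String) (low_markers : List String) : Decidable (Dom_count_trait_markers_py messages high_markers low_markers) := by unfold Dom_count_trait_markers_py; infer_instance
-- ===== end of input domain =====

-- B replaces the per-word two-set membership scan with a word-frequency dict built once and then summed per marker (alternative traversal direction, same cost).
-- ===== PORT A =====
-- shared helper: msg.get('content', '').lower().split()  (both Pythons compute exactly this per message)
def pvWordsOf (msg : List (String × String)) : List String :=
  PySem.Str.split₀ (PySem.Str.lower ((PySem.Dict.ofList msg).getD "content" ""))

def count_trait_markers_py (messages : List (List (String × String))) (high_markers : List String) (low_markers : List String) : Int × Int :=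
  messages.foldl (fun (acc : Int × Int) msg =>
    let words := pvWordsOf msg
    (acc.1 + words.foldl (fun s w => s + if w ∈ high_markers then 1 else 0) (0 : Int),
     acc.2 + words.foldl (fun s w => s + if w ∈ low_markers then 1 else 0) (0 : Int)))
    (0, 0)

-- ===== PORT B =====
-- B: one frequency dict over all words, then a lookup-sum per marker list.
def count_trait_markers_py_alt (messages : List (List (String × String))) (high_markers : List String) (low_markers : List String) : Int × Int :=
  let counts : PySem.Dict String Int :=
    messages.foldl (fun d msg =>
      (pvWordsOf msg).foldl (fun d w => d.insert w (d.getD w 0 + 1)) d)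
      PySem.Dict.empty
  (high_markers.foldl (fun s w => s + counts.getD w 0) (0 : Int),
   low_markers.foldl (fun s w => s + counts.getD w 0) (0 : Int))

-- ===== PRECONDITION & SPEC =====
-- Pre_ requires the two marker lists to be duplicate-free: they encode Python SETS
-- (type convention: set -> list of distinct elements), so a list with duplicates is
-- not a valid encoding of an input A accepts.
def Pre_count_trait_markers_py (messages : List (List (String × String))) (high_markers : List String) (low_markers : List String) : Prop :=
  high_markers.Nodup ∧ low_markers.Nodup
instance (messages : List (List (String × String))) (high_markers : List String) (low_markers : List String) : Decidable (Pre_count_trait_markers_py messages high_markers low_markers) := by unfold Pre_count_trait_markers_py; infer_instance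

def pvWitness_count_trait_markers_py : (List (List (String × String))) × List String × List String :=
  ([[("content", "Hi there hi")], [("other", "x")]], ["hi", "lo"], ["there"])

def Spec_count_trait_markers_py (messages : List (List (String × String))) (high_markers : List String) (low_markers : List String) (out : Int × Int) : Prop := out = count_trait_markers_py_alt messages high_markers low_markers
instance (messages : List (List (String × String))) (high_markers : List String) (low_markers : List String) (out : Int × Int) : Decidable (Spec_count_trait_markers_py messages high_markers low_markers out) := by unfold Spec_count_trait_markers_py; infer_instance

-- ===== CLAIM =====
def Claim_equal_count_trait_markers_py : Prop := ∀ (messages : List (List (String × String))) (high_markers : List String) (low_markers : List String), Dom_count_trait_markers_py messages high_markers low_markers → Pre_count_trait_markers_py messages high_markers low_markers → Spec_count_trait_markers_py messages high_markers low_markers (count_trait_markers_py messages high_markers low_markers)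

-- ===== LEMMAS AND PROOFS =====

-- a conditional-increment fold is a countP
lemma foldl_if_count (p : String → Prop) [DecidablePred p] (ws : List String) (c : Int) :
    ws.foldl (fun s w => s + if p w then 1 else 0) c = c + (ws.countP (fun w => decide (p w)) : Int) := by
  induction ws generalizing c with
  | nil => simp
  | cons x t ih => simp [List.countP_cons, ih]; split_ifs <;> omega

-- indicator sum over a list = multiplicity
lemma sum_indicator_eq_count (m : List String) (x : String) :
    (m.map (fun w => if x = w then (1 : ℕ) else 0)).sum = m.count x := by
  induction m with
  | nil => simp
  | cons a t ih =>
      simp only [List.map_cons, List.sum_cons, List.count_cons, ih]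
      rcases eq_or_ne a x with h | h
      · subst h; simp [Nat.add_comm]
      · simp [h, h.symm]

-- the key reversal: summing multiplicities over a Nodup marker list = counting marked words
lemma sum_count_eq_countP (m ws : List String) (hm : m.Nodup) :
    (m.map (fun w => ws.count w)).sum = ws.countP (fun w => decide (w ∈ m)) := by
  induction ws with
  | nil => simp
  | cons x t ih =>
      have hcnt : (m.map (fun w => (x :: t).count w)).sum
          = (m.map (fun w => t.count w)).sum + (m.map (fun w => if x = w then (1:ℕ) else 0)).sum := by
        rw [← List.sum_map_add]
        refine congrArg List.sum (List.map_congr_left ?_)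
        intro w _; simp [List.count_cons]
      rw [hcnt, ih, sum_indicator_eq_count, List.countP_cons]
      by_cases h : x ∈ m
      · simp [h, List.count_eq_one_of_mem hm h]
      · simp [h, List.count_eq_zero_of_not_mem h]

-- the frequency dict built by B gives total multiplicities
lemma counts_getD (messages : List (List (String × String))) (w : String) (d : PySem.Dict String Int) :
    (messages.foldl (fun d msg => (pvWordsOf msg).foldl (fun d w => d.insert w (d.getD w 0 + 1)) d) d).getD w 0
      = d.getD w 0 + ((messages.flatMap pvWordsOf).count w : Int) := by
  induction messages generalizing d with
  | nil => simp
  | cons msg t ih =>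
      simp only [List.foldl_cons, ih, PySem.Dict.getD_foldl_insert_add_one, List.flatMap_cons,
        List.count_append]
      push_cast; ring

-- B's marker-sum equals the marked-word count of the concatenation
lemma alt_side (m : List String) (messages : List (List (String × String))) (hm : m.Nodup) :
    m.foldl (fun s w => s +
        (messages.foldl (fun d msg => (pvWordsOf msg).foldl (fun d w => d.insert w (d.getD w 0 + 1)) d)
          PySem.Dict.empty).getD w 0) (0 : Int)
      = ((messages.flatMap pvWordsOf).countP (fun w => decide (w ∈ m)) : Int) := by
  rw [PySem.List.foldl_add]
  have : ∀ w : String,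
      (messages.foldl (fun d msg => (pvWordsOf msg).foldl (fun d w => d.insert w (d.getD w 0 + 1)) d)
        PySem.Dict.empty).getD w 0 = ((messages.flatMap pvWordsOf).count w : Int) := by
    intro w; rw [counts_getD]; simp
  rw [List.map_congr_left (fun w _ => this w), ← sum_count_eq_countP m _ hm]
  push_cast [List.map_map]
  simp [Function.comp_def]

-- A's fold accumulates the marked-word counts message by message
lemma a_side (messages : List (List (String × String))) (high low : List String) (acc : Int × Int) :
    messages.foldl (fun (acc : Int × Int) msg =>
      let words := pvWordsOf msg
      (acc.1 + words.foldl (fun s w => s + if w ∈ high then 1 else 0) (0 : Int),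
       acc.2 + words.foldl (fun s w => s + if w ∈ low then 1 else 0) (0 : Int))) acc
    = (acc.1 + ((messages.flatMap pvWordsOf).countP (fun w => decide (w ∈ high)) : Int),
       acc.2 + ((messages.flatMap pvWordsOf).countP (fun w => decide (w ∈ low)) : Int)) := by
  induction messages generalizing acc with
  | nil => simp
  | cons msg t ih =>
      simp only [List.foldl_cons]
      rw [ih]
      simp only [foldl_if_count (fun w => w ∈ high), foldl_if_count (fun w => w ∈ low),
        List.flatMap_cons, List.countP_append, Prod.mk.injEq]
      constructor <;> (push_cast; ring)

-- ===== VERDICT =====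
theorem count_trait_markers_py_spec : Claim_equal_count_trait_markers_py := by
  intro messages high low _ hpre
  unfold Spec_count_trait_markers_py count_trait_markers_py count_trait_markers_py_alt
  dsimp only
  rw [a_side, alt_side high messages hpre.1, alt_side low messages hpre.2]
  simp
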